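-- pv_equiv track=rewrite | github.com/smileostrich/algorithm-practice | problemSolving/others/del2/p1.py | solution
-- ===== SOURCE A (Python) =====
-- from collections import defaultdict
--
-- def solution(lottery):
--     dic_person = defaultdict(int)
--     dic_result = dict()
--     for cur in lottery:
--         if cur[1] == 1:
--             if cur[0] not in dic_result:
--                 dic_result[cur[0]] = dic_person[cur[0]]+1
--         else:
--             dic_person[cur[0]] += 1
--     if len(dic_result.keys()) == 0:
--         return 0
--     else:
--         return sum(dic_result.values())//len(dic_result.keys())
-- ===== SOURCE B (Python) =====
-- def solution(lottery):
--     groups = {}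
--     for person, outcome in lottery:
--         groups.setdefault(person, []).append(outcome)
--     tries = [outs.index(1) + 1 for outs in groups.values() if 1 in outs]
--     if not tries:
--         return 0
--     return sum(tries) // len(tries)
-- ===== Notes on version B (the rewrite author's own statement) =====
-- stated objective: alternative
-- what changed: Replaces A's single streaming pass that maintains two live dicts (running loss counts and first-win records) with a group-then-scan decomposition: first group each person's outcomes in order, then read each winner's tries as index of the first 1 plus one.
import Mathlib
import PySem

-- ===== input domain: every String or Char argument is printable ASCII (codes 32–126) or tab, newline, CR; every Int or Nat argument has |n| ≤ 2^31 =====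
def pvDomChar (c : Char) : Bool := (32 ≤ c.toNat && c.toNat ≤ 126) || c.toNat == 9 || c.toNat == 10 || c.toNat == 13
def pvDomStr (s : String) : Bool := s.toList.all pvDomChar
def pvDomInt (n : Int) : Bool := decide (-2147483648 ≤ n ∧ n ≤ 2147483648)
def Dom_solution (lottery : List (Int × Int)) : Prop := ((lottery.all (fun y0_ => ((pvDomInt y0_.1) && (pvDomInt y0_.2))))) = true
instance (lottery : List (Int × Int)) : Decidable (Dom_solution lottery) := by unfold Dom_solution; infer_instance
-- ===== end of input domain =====

-- B replaces A's single streaming pass over two live dicts by a group-then-scan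
-- decomposition (group outcomes per person, then read off index of first win); objective: alternative.

-- ===== PORT A =====
-- one iteration of A's for-loop: state = (dic_person, dic_result)
def solutionStep (st : PySem.Dict Int Int × PySem.Dict Int Int) (cur : Int × Int) :
    PySem.Dict Int Int × PySem.Dict Int Int :=
  if cur.2 == 1 then
    if st.2.contains cur.1 then st
    else (st.1, st.2.insert cur.1 (st.1.getD cur.1 0 + 1))
  else (st.1.modify cur.1 0 (· + 1), st.2)

def solution (lottery : List (Int × Int)) : Int :=
  let st := lottery.foldl solutionStep (PySem.Dict.empty, PySem.Dict.empty)
  if st.2.keys.length = 0 then 0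
  else PySem.Int.floordiv st.2.values.sum (st.2.keys.length : Int)

-- ===== PORT B =====
-- the comprehension body: tries-to-first-win for one person's ordered outcome list
def solutionAltF (outs : List Int) : Option Int :=
  if (1 : Int) ∈ outs then (PySem.List.index? outs 1).map (fun i => (i : Int) + 1) else none

def solution_alt (lottery : List (Int × Int)) : Int :=
  let groups := lottery.foldl (fun d p => d.modify p.1 [] (· ++ [p.2])) PySem.Dict.empty
  let tries := groups.values.filterMap solutionAltF
  if tries = [] then 0
  else PySem.Int.floordiv tries.sum (tries.length : Int)

-- ===== PRECONDITION & SPEC =====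
def Spec_solution (lottery : List (Int × Int)) (out : Int) : Prop := out = solution_alt lottery
instance (lottery : List (Int × Int)) (out : Int) : Decidable (Spec_solution lottery out) := by unfold Spec_solution; infer_instance

-- ===== CLAIM (what is proved, stated in full; the proofs are below) =====
def Claim_equal_solution : Prop := ∀ (lottery : List (Int × Int)), Dom_solution lottery → Spec_solution lottery (solution lottery)

-- ===== LEMMAS AND PROOFS =====

-- outcomes of person p, in input order
def outsOf (l : List (Int × Int)) (p : Int) : List Int :=
  (l.filter (fun q => q.1 == p)).map (·.2)

-- persons in first-appearance order
def persons (l : List (Int × Int)) : List Int := PySem.Set.ofList (l.map Prod.fst)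

-- the (person, tries) pairs B conceptually produces
def W (l : List (Int × Int)) : List (Int × Int) :=
  (persons l).filterMap (fun p => (solutionAltF (outsOf l p)).map (fun v => (p, v)))

lemma outsOf_append (l : List (Int × Int)) (x : Int × Int) (q : Int) :
    outsOf (l ++ [x]) q = outsOf l q ++ (if x.1 = q then [x.2] else []) := by
  simp only [outsOf, List.filter_append, List.map_append]
  congr 1
  by_cases h : x.1 = q <;> simp [h]

lemma outsOf_of_not_mem (l : List (Int × Int)) (p : Int) (h : p ∉ l.map Prod.fst) :
    outsOf l p = [] := by
  simp only [outsOf, List.map_eq_nil_iff, List.filter_eq_nil_iff]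
  intro q hq
  simp only [beq_iff_eq]
  intro he
  exact h (he ▸ List.mem_map_of_mem hq)

lemma mem_persons (l : List (Int × Int)) (p : Int) : p ∈ persons l ↔ p ∈ l.map Prod.fst :=
  by simp only [persons]; exact PySem.Set.mem_ofList (l.map Prod.fst) p

lemma solutionAltF_append_eq (outs : List Int) (o : Int) (h : o ≠ 1 ∨ (1 : Int) ∈ outs) :
    solutionAltF (outs ++ [o]) = solutionAltF outs := by
  by_cases hm : (1 : Int) ∈ outs
  · unfold solutionAltF
    rw [if_pos (List.mem_append.mpr (Or.inl hm)), if_pos hm,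
        PySem.List.index?_append_of_mem [o] hm]
  · have ho : o ≠ 1 := h.resolve_right hm
    have hm' : (1 : Int) ∉ outs ++ [o] := by
      simp [hm, Ne.symm ho]
    unfold solutionAltF
    rw [if_neg hm', if_neg hm]

lemma persons_append (l : List (Int × Int)) (x : Int × Int) :
    persons (l ++ [x]) = PySem.Set.add (persons l) x.1 := by
  simp [persons, PySem.Set.ofList_append_singleton]

lemma solutionAltF_outs_eq (l : List (Int × Int)) (x : Int × Int) (q : Int) (hq : q ≠ x.1) :
    solutionAltF (outsOf (l ++ [x]) q) = solutionAltF (outsOf l q) := by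
  rw [outsOf_append, if_neg (Ne.symm hq), List.append_nil]

lemma W_append_eq (l : List (Int × Int)) (x : Int × Int)
    (h : solutionAltF (outsOf (l ++ [x]) x.1) = solutionAltF (outsOf l x.1)) :
    W (l ++ [x]) = W l := by
  unfold W
  rw [persons_append]
  have hcong : ∀ q ∈ PySem.Set.add (persons l) x.1,
      (solutionAltF (outsOf (l ++ [x]) q)).map (fun v => (q, v))
        = (solutionAltF (outsOf l q)).map (fun v => (q, v)) := by
    intro q _
    by_cases hq : q = x.1
    · subst hq; rw [h]
    · rw [solutionAltF_outs_eq l x q hq]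
  rw [List.filterMap_congr hcong]
  by_cases hp : x.1 ∈ persons l
  · rw [PySem.Set.add_of_mem hp]
  · rw [PySem.Set.add_of_not_mem hp, List.filterMap_append]
    have h0 : outsOf l x.1 = [] :=
      outsOf_of_not_mem l x.1 (fun hm => hp ((mem_persons l x.1).mpr hm))
    simp [h0, solutionAltF]

lemma filterMap_update_perm {β : Type} (s : List Int) (f g : Int → Option β) (p : Int) (v : β)
    (hnd : s.Nodup) (hfg : ∀ q, q ≠ p → g q = f q) (hfp : f p = none) (hgp : g p = some v) :
    ((PySem.Set.add s p).filterMap g).Perm (s.filterMap f ++ [v]) := by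
  by_cases hp : p ∈ s
  · rw [PySem.Set.add_of_mem hp]
    obtain ⟨t, u, rfl⟩ := List.append_of_mem hp
    have hsplit := List.nodup_append.mp hnd
    have hnt : p ∉ t := fun h => hsplit.2.2 p h p List.mem_cons_self rfl
    have hnu : p ∉ u := (List.nodup_cons.mp hsplit.2.1).1
    have hgt : t.filterMap g = t.filterMap f :=
      List.filterMap_congr (fun q hq => hfg q (fun he => hnt (he ▸ hq)))
    have hgu : u.filterMap g = u.filterMap f :=
      List.filterMap_congr (fun q hq => hfg q (fun he => hnu (he ▸ hq)))
    rw [List.filterMap_append, List.filterMap_append,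
        List.filterMap_cons_some hgp, List.filterMap_cons_none hfp, hgt, hgu]
    exact List.Perm.trans List.perm_middle (List.perm_append_singleton v _).symm
  · rw [PySem.Set.add_of_not_mem hp, List.filterMap_append]
    have hgs : s.filterMap g = s.filterMap f :=
      List.filterMap_congr (fun q hq => hfg q (fun he => hp (he ▸ hq)))
    rw [hgs, List.filterMap_cons_some hgp, List.filterMap_nil]

lemma solution_inv (l : List (Int × Int)) :
    (∀ p, (l.foldl solutionStep (PySem.Dict.empty, PySem.Dict.empty)).1.getD p 0
        = ((outsOf l p).countP (fun o => !(o == 1)) : Int)) ∧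
    (l.foldl solutionStep (PySem.Dict.empty, PySem.Dict.empty)).2.keys.Nodup ∧
    (∀ p, (l.foldl solutionStep (PySem.Dict.empty, PySem.Dict.empty)).2.contains p = true ↔ (1 : Int) ∈ outsOf l p) ∧
    (l.foldl solutionStep (PySem.Dict.empty, PySem.Dict.empty)).2.items.Perm (W l) := by
  induction l using List.reverseRecOn with
  | nil =>
    refine ⟨?_, ?_, ?_, ?_⟩
    · intro p; simp [outsOf, PySem.Dict.getD_empty]
    · simp [PySem.Dict.keys_empty]
    · intro p; simp [outsOf, PySem.Dict.contains_empty]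
    · simp only [List.foldl_nil, W, persons]
      simp [PySem.Dict.empty]
  | append_singleton l x ih =>
    obtain ⟨ih1, ih2, ih3, ih4⟩ := ih
    obtain ⟨p, o⟩ := x
    rw [List.foldl_append] at *
    set st := l.foldl solutionStep (PySem.Dict.empty, PySem.Dict.empty) with hst
    simp only [List.foldl_cons, List.foldl_nil, solutionStep]
    by_cases ho : o = 1
    · subst ho
      rw [if_pos (by simp)]
      by_cases hc : st.2.contains p = true
      · -- already won: state unchanged
        rw [if_pos hc]
        have hmem : (1 : Int) ∈ outsOf l p := (ih3 p).mp hc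
        have hW : W (l ++ [(p, 1)]) = W l :=
          W_append_eq l (p, 1) (by
            rw [outsOf_append, if_pos rfl]
            exact solutionAltF_append_eq _ _ (Or.inr hmem))
        refine ⟨?_, ih2, ?_, hW ▸ ih4⟩
        · intro q
          rw [ih1 q, outsOf_append]
          by_cases hq : q = p
          · subst hq; simp [List.countP_append]
          · simp [Ne.symm hq]
        · intro q
          rw [ih3 q, outsOf_append]
          by_cases hq : q = p
          · subst hq; simp [hmem]
          · simp [Ne.symm hq]
      · -- first win: record tries = losses-so-far + 1
        rw [if_neg hc]
        have hnm : (1 : Int) ∉ outsOf l p := fun h => hc ((ih3 p).mpr h)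
        have hcount : (outsOf l p).countP (fun o => !(o == 1)) = (outsOf l p).length :=
          List.countP_eq_length.mpr (fun a ha => by
            simp only [Bool.not_eq_true', beq_eq_false_iff_ne, ne_eq]
            exact fun he => hnm (he ▸ ha))
        have hval : st.1.getD p 0 + 1 = ((outsOf l p).length : Int) + 1 := by
          rw [ih1 p, hcount]
        refine ⟨?_, ?_, ?_, ?_⟩
        · intro q
          rw [ih1 q, outsOf_append]
          by_cases hq : q = p
          · subst hq; simp [List.countP_append]
          · simp [Ne.symm hq]
        · exact PySem.Dict.nodup_keys_insert st.2 p _ ih2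
        · intro q
          rw [PySem.Dict.contains_insert, outsOf_append]
          by_cases hq : q = p
          · subst hq; simp
          · have hb : (q == p) = false := by simpa using hq
            rw [hb, Bool.false_or, if_neg (Ne.symm hq), List.append_nil]
            exact ih3 q
        · rw [PySem.Dict.items_insert_of_not_contains st.2 _ (by simpa using hc)]
          have hperm1 : (st.2.items ++ [(p, st.1.getD p 0 + 1)]).Perm
              (W l ++ [(p, ((outsOf l p).length : Int) + 1)]) := by
            rw [hval]
            exact ih4.append_right _
          refine hperm1.trans ?_
          have hgp : (solutionAltF (outsOf (l ++ [(p, 1)]) p)).map (fun v => (p, v))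
              = some (p, ((outsOf l p).length : Int) + 1) := by
            rw [outsOf_append, if_pos rfl]
            have hidx : PySem.List.index? (outsOf l p ++ [1]) 1 = some (outsOf l p).length :=
              PySem.List.index?_append_singleton_self _ _ hnm
            unfold solutionAltF
            rw [if_pos (List.mem_append.mpr (Or.inr List.mem_cons_self)), hidx]
            rfl
          have hfp : (solutionAltF (outsOf l p)).map (fun v => (p, v)) = none := by
            unfold solutionAltF
            rw [if_neg hnm]
            rfl
          refine List.Perm.symm ?_
          have hmain := filterMap_update_perm (persons l)
            (fun q => (solutionAltF (outsOf l q)).map (fun v => (q, v)))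
            (fun q => (solutionAltF (outsOf (l ++ [(p, 1)]) q)).map (fun v => (q, v)))
            p (p, ((outsOf l p).length : Int) + 1)
            (PySem.Set.nodup_ofList _)
            (fun q hq => by
              have hx := solutionAltF_outs_eq l (p, 1) q hq
              simp only [hx]) hfp hgp
          rw [W, persons_append]
          exact hmain
    · -- a loss: dic_person[p] += 1
      rw [if_neg (by simp [ho])]
      have hW : W (l ++ [(p, o)]) = W l :=
        W_append_eq l (p, o) (by
          rw [outsOf_append, if_pos rfl]
          exact solutionAltF_append_eq _ _ (Or.inl ho))
      refine ⟨?_, ih2, ?_, hW ▸ ih4⟩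
      · intro q
        rw [PySem.Dict.getD_modify, outsOf_append]
        by_cases hq : q = p
        · subst hq
          rw [if_pos rfl, if_pos rfl, ih1 q]
          have : (o == (1 : Int)) = false := by simpa using ho
          simp [List.countP_append, this]
        · rw [if_neg hq, if_neg (by exact fun h => hq h.symm ), ih1 q]
          simp
      · intro q
        rw [ih3 q, outsOf_append]
        by_cases hq : q = p
        · subst hq
          have ho2 : (1 : Int) ≠ o := fun h => ho h.symm
          simp [ho2]
        · simp [Ne.symm hq]

theorem solution_spec_aux (lottery : List (Int × Int)) : solution lottery = solution_alt lottery := by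
  obtain ⟨_, _, _, hperm⟩ := solution_inv lottery
  unfold solution solution_alt
  set st := lottery.foldl solutionStep (PySem.Dict.empty, PySem.Dict.empty) with hst
  set groups := lottery.foldl (fun d p => d.modify p.1 [] (· ++ [p.2])) PySem.Dict.empty with hg
  have hnodg : groups.keys.Nodup := by
    rw [hg]
    exact PySem.Dict.nodup_keys_foldl_modify_key lottery Prod.fst [] _ PySem.Dict.empty
      (by simp [PySem.Dict.keys_empty])
  have hkeys : groups.keys = persons lottery := by
    rw [hg, PySem.Dict.keys_foldl_modify_key]
    simp [persons, PySem.Dict.keys_empty, PySem.Set.update_nil_left]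
  have hget : ∀ c, groups.getD c [] = outsOf lottery c := by
    intro c
    rw [hg, PySem.Dict.getD_foldl_modify_append]
    simp [outsOf, PySem.Dict.getD_empty]
  have hvals : groups.values = (persons lottery).map (fun p => outsOf lottery p) := by
    rw [PySem.Dict.values_eq_map_keys groups hnodg [], hkeys]
    exact List.map_congr_left (fun p _ => hget p)
  have htries : groups.values.filterMap solutionAltF = (W lottery).map (·.2) := by
    rw [hvals, List.filterMap_map, W, List.map_filterMap]
    apply List.filterMap_congr
    intro q _
    cases h : solutionAltF (outsOf lottery q) <;> simp [Function.comp, h]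
  have hsum : st.2.values.sum = (groups.values.filterMap solutionAltF).sum := by
    rw [htries]
    exact (hperm.map _).sum_eq
  have hlen : st.2.keys.length = (groups.values.filterMap solutionAltF).length := by
    rw [htries, List.length_map]
    have h1 : st.2.keys.length = st.2.items.length := by
      simp [PySem.Dict.keys]
    rw [h1, hperm.length_eq]
  simp only [hsum, hlen]
  by_cases hz : (groups.values.filterMap solutionAltF).length = 0
  · rw [if_pos hz, if_pos (List.length_eq_zero_iff.mp hz)]
  · rw [if_neg hz, if_neg (fun h => hz (by rw [h]; rfl))]

-- ===== VERDICT (by name: the statement is the Claim_ definition above) =====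
theorem solution_spec : Claim_equal_solution := by
  intro lottery _
  unfold Spec_solution
  exact solution_spec_aux lottery
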